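-- pv_equiv track=rewrite | github.com/xicarpenter/seminar_crowdshipping | collect_lines.py | extend_slashes
-- ===== SOURCE A (Python) =====
-- def extend_slashes(input_list):
--     output_list = []
--     last_prefix = input_list[0]
--
--     for item in input_list:
--         if item.startswith("/"):
--             # Replace with the last prefix if it exists
--             output_list.append((last_prefix + item))
--         else:
--             # Update the last prefix if the current item has a "/"
--             last_prefix = item.split("/")[0]
--             output_list.append(item)
--
--     return output_list
-- ===== SOURCE B (Python) =====
-- def extend_slashes(input_list):
--     # Run-based two-pointer scheme: consume each maximal run of slash-prefixed
--     # items at once (extending them all with the current prefix), then the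
--     # non-slash item that follows sets the next prefix.
--     out = []
--     prefix = input_list[0]          # seed; empty input raises IndexError as in A
--     i, n = 0, len(input_list)
--     while i < n:
--         j = i
--         while j < n and input_list[j].startswith("/"):
--             j += 1
--         out.extend(prefix + s for s in input_list[i:j])
--         if j < n:
--             item = input_list[j]
--             prefix = item.split("/")[0]
--             out.append(item)
--         i = j + 1
--     return out
-- ===== Notes on version B (the rewrite author's own statement) =====
-- stated objective: alternative
-- what changed: A's single per-item accumulator loop is replaced by a run-based two-pointer scheme: an outer loop that locates each maximal run of slash-prefixed items, extends the whole run with the current prefix at once, then takes the next non-slash item as the new prefix.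
import Mathlib
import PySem

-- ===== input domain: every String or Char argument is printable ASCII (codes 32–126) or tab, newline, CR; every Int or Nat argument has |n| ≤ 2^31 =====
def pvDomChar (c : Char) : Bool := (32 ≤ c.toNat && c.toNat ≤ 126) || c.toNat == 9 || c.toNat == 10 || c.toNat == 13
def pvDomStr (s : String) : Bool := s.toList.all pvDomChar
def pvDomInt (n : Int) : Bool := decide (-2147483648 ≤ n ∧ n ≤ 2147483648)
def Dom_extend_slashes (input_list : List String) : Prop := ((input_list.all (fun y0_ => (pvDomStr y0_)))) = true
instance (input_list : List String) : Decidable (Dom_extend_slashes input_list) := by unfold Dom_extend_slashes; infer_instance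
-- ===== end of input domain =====

-- B replaces A's per-item accumulator loop with a run-based two-pointer scheme (consume each maximal slash run at once); objective: alternative, same cost.


-- shared helper: item.split("/")[0]; split? is some (sep ≠ "") and never returns [], so headD "" is exactly index [0]
def pvSplit0 (item : String) : String := ((PySem.Str.split? item "/").getD []).headD ""

-- ===== PORT A =====
def extend_slashes (input_list : List String) : List String :=
  match PySem.List.pyGet? input_list 0 with
  | none => []   -- IndexError in Python; excluded by Pre_
  | some lp0 =>
    (input_list.foldl (fun (st : List String × String) item =>
        if PySem.Str.startswith item "/" then (st.1 ++ [st.2 ++ item], st.2)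
        else (st.1 ++ [item], pvSplit0 item))
      (([] : List String), lp0)).1

-- ===== PORT B =====
-- outer while loop of Source B: the inner scan `while j < n and input_list[j].startswith("/")`
-- together with the slice input_list[i:j] is takeWhile/dropWhile on the remaining list
def extend_slashes_alt_go (l : List String) (pre : String) : List String :=
  let run := (l.takeWhile (fun s => PySem.Str.startswith s "/")).map (fun s => pre ++ s)
  match h : l.dropWhile (fun s => PySem.Str.startswith s "/") with
  | [] => run
  | item :: rest => run ++ item :: extend_slashes_alt_go rest (pvSplit0 item)
termination_by l.length
decreasing_by
  have := List.length_dropWhile_le (p := fun s => PySem.Str.startswith s "/") (l := l)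
  rw [h] at this; simp at this; omega

def extend_slashes_alt (input_list : List String) : List String :=
  match PySem.List.pyGet? input_list 0 with
  | none => []   -- IndexError in Python; excluded by Pre_
  | some p0 => extend_slashes_alt_go input_list p0

-- ===== PRECONDITION & SPEC =====
-- Pre_ excludes only the empty list, on which both Pythons raise IndexError (input_list[0]).
def Pre_extend_slashes (input_list : List String) : Prop := input_list ≠ []
instance (input_list : List String) : Decidable (Pre_extend_slashes input_list) := by unfold Pre_extend_slashes; infer_instance
def pvWitness_extend_slashes : List String := ["a/b", "/c", "d", "/e"]
def Spec_extend_slashes (input_list : List String) (out : List String) : Prop := out = extend_slashes_alt input_list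
instance (input_list : List String) (out : List String) : Decidable (Spec_extend_slashes input_list out) := by unfold Spec_extend_slashes; infer_instance

-- ===== CLAIM (what is proved, stated in full; the proofs are below) =====
def Claim_equal_extend_slashes : Prop := ∀ (input_list : List String), Dom_extend_slashes input_list → Pre_extend_slashes input_list → Spec_extend_slashes input_list (extend_slashes input_list)

-- ===== LEMMAS AND PROOFS =====

-- reference recursion: what A's loop appends, item by item
def pvARef : List String → String → List String
  | [], _ => []
  | x :: xs, p =>
    if PySem.Str.startswith x "/" then (p ++ x) :: pvARef xs p
    else x :: pvARef xs (pvSplit0 x)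

theorem foldA_eq (l : List String) (acc : List String) (p : String) :
    (l.foldl (fun (st : List String × String) item =>
        if PySem.Str.startswith item "/" then (st.1 ++ [st.2 ++ item], st.2)
        else (st.1 ++ [item], pvSplit0 item)) (acc, p)).1 = acc ++ pvARef l p := by
  induction l generalizing acc p with
  | nil => simp [pvARef]
  | cons x xs ih =>
    simp only [PySem.Str.startswith_eq, show "/".toList = ['/'] from rfl] at ih ⊢
    by_cases h : PySem.Chars.startswith x.toList ['/'] <;>
      simp [pvARef, h, ih, List.append_assoc]

-- pvARef handles a maximal slash run in one block
theorem aref_run (l : List String) (p : String) :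
    pvARef l p =
      (l.takeWhile (fun s => PySem.Str.startswith s "/")).map (fun s => p ++ s) ++
        (match l.dropWhile (fun s => PySem.Str.startswith s "/") with
         | [] => []
         | x :: xs => x :: pvARef xs (pvSplit0 x)) := by
  induction l generalizing p with
  | nil => simp [pvARef]
  | cons x xs ih =>
    simp only [PySem.Str.startswith_eq, show "/".toList = ['/'] from rfl] at ih ⊢
    by_cases h : PySem.Chars.startswith x.toList ['/']
    · simp [pvARef, h, ih]
    · simp [pvARef, h]

theorem go_eq_aux (n : Nat) : ∀ (l : List String) (p : String), l.length ≤ n →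
    extend_slashes_alt_go l p = pvARef l p := by
  induction n with
  | zero =>
    intro l p h
    have : l = [] := List.eq_nil_of_length_eq_zero (Nat.le_zero.mp h)
    subst this
    rw [extend_slashes_alt_go]; simp [pvARef]
  | succ n ih =>
    intro l p h
    rw [extend_slashes_alt_go, aref_run]
    cases hd : l.dropWhile (fun s => PySem.Str.startswith s "/") with
    | nil => simp
    | cons x xs =>
      have hlen := List.length_dropWhile_le (p := fun s => PySem.Str.startswith s "/") (l := l)
      rw [hd] at hlen; simp at hlen
      simp [ih xs (pvSplit0 x) (by omega)]

theorem go_eq (l : List String) (p : String) : extend_slashes_alt_go l p = pvARef l p :=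
  go_eq_aux l.length l p (Nat.le_refl _)

-- ===== VERDICT (by name: the statement is the Claim_ definition above) =====
theorem extend_slashes_spec : Claim_equal_extend_slashes := by
  intro input_list _ _
  unfold Spec_extend_slashes extend_slashes extend_slashes_alt
  cases h : PySem.List.pyGet? input_list 0 with
  | none => rfl
  | some p0 => dsimp only; rw [foldA_eq, go_eq]; simp
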